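-- pv_equiv track=rewrite | github.com/pawel-kncck/lemur-app | backend/analysis_engine.py | format_code_for_display
-- ===== SOURCE A (Python) =====
-- def format_code_for_display(code: str) -> str:
--     """
--     Format code for display in the UI
--
--     Args:
--         code: Raw Python code
--
--     Returns:
--         Formatted code string
--     """
--     if not code or code == "# Code execution details not available":
--         return ""
--
--     # Clean up the code
--     lines = code.split('\n')
--     cleaned_lines = []
--
--     for line in lines:
--         # Remove excessive whitespace
--         line = line.rstrip()
--
--         # Skip empty lines at the beginning/end
--         if line or cleaned_lines:
--             cleaned_lines.append(line)
--
--     # Remove trailing empty lines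
--     while cleaned_lines and not cleaned_lines[-1]:
--         cleaned_lines.pop()
--
--     return '\n'.join(cleaned_lines)
-- ===== SOURCE B (Python) =====
-- def format_code_for_display(code: str) -> str:
--     if not code or code == "# Code execution details not available":
--         return ""
--     # rstrip everything up front, then trim blank lines off both ends
--     lines = [line.rstrip() for line in code.split('\n')]
--     while lines and not lines[0]:
--         lines = lines[1:]
--     while lines and not lines[-1]:
--         lines = lines[:-1]
--     return '\n'.join(lines)
-- ===== Notes on version B (the rewrite author's own statement) =====
-- stated objective: simpler
-- what changed: Replaces A's single accumulator pass (which skips leading blanks via an 'or cleaned_lines' guard inside the loop) with a plain map of rstrip over all lines followed by symmetric trimming of blank lines from both ends.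
import Mathlib
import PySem

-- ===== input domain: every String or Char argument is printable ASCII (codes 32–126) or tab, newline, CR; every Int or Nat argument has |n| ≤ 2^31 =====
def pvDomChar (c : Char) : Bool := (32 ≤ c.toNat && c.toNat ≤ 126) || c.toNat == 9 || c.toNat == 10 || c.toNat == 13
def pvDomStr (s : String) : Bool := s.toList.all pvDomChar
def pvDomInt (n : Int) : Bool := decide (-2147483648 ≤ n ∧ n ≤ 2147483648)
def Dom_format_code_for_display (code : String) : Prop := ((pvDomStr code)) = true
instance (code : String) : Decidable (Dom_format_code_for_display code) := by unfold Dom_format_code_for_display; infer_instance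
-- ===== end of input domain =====

-- B replaces A's accumulator pass (leading-blank skip folded into the loop) with map-rstrip
-- then symmetric trimming of blank lines from both ends; objective: simpler.


-- ===== PORT A =====
-- 'while cleaned_lines and not cleaned_lines[-1]: cleaned_lines.pop()'
def pvPopTrailA (xs : List String) : List String :=
  if h : xs.getLast? = some "" then pvPopTrailA xs.dropLast else xs
termination_by xs.length
decreasing_by
  cases xs with
  | nil => simp at h
  | cons a as => simp [List.length_dropLast]

def format_code_for_display (code : String) : String :=
  if code = "" ∨ code = "# Code execution details not available" then ""
  else
    let lines := (PySem.Str.split? code "\n").getD []  -- sep "\n" ≠ "", so split? is always some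
    let cleaned_lines := lines.foldl
      (fun acc line =>
        let line := PySem.Str.rstrip line
        if line ≠ "" ∨ acc ≠ [] then acc ++ [line] else acc) []
    PySem.Str.join "\n" (pvPopTrailA cleaned_lines)

-- ===== PORT B =====
-- 'while lines and not lines[0]: lines = lines[1:]'
def pvDropLeadB : List String → List String
  | [] => []
  | x :: xs => if x = "" then pvDropLeadB xs else x :: xs

-- 'while lines and not lines[-1]: lines = lines[:-1]'
def pvDropTrailB (xs : List String) : List String :=
  if h : xs.getLast? = some "" then pvDropTrailB xs.dropLast else xs
termination_by xs.length
decreasing_by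
  cases xs with
  | nil => simp at h
  | cons a as => simp [List.length_dropLast]

def format_code_for_display_alt (code : String) : String :=
  if code = "" ∨ code = "# Code execution details not available" then ""
  else
    -- sep "\n" ≠ "", so split? is always some
    let lines := ((PySem.Str.split? code "\n").getD []).map PySem.Str.rstrip
    PySem.Str.join "\n" (pvDropTrailB (pvDropLeadB lines))

-- ===== PRECONDITION & SPEC =====
def Spec_format_code_for_display (code : String) (out : String) : Prop := out = format_code_for_display_alt code
instance (code : String) (out : String) : Decidable (Spec_format_code_for_display code out) := by unfold Spec_format_code_for_display; infer_instance

-- ===== CLAIM (what is proved, stated in full; the proofs are below) =====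
def Claim_equal_format_code_for_display : Prop := ∀ (code : String), Dom_format_code_for_display code → Spec_format_code_for_display code (format_code_for_display code)

-- ===== LEMMAS AND PROOFS =====

-- A's fold with a non-empty accumulator just appends every rstripped line
theorem pvFoldA_of_ne (ls : List String) (acc : List String) (hacc : acc ≠ []) :
    ls.foldl (fun acc line =>
        let line := PySem.Str.rstrip line
        if line ≠ "" ∨ acc ≠ [] then acc ++ [line] else acc) acc
      = acc ++ ls.map PySem.Str.rstrip := by
  induction ls generalizing acc with
  | nil => simp
  | cons l ls ih =>
      simp only [List.foldl_cons, List.map_cons]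
      rw [if_pos (Or.inr hacc), ih _ (by simp), List.append_assoc]
      rfl

-- A's fold from the empty accumulator = B's map-then-drop-leading-blanks
theorem pvFoldA_eq (ls : List String) :
    ls.foldl (fun acc line =>
        let line := PySem.Str.rstrip line
        if line ≠ "" ∨ acc ≠ [] then acc ++ [line] else acc) []
      = pvDropLeadB (ls.map PySem.Str.rstrip) := by
  induction ls with
  | nil => rfl
  | cons l ls ih =>
      simp only [List.foldl_cons, List.map_cons, pvDropLeadB]
      by_cases h : PySem.Str.rstrip l = ""
      · simpa [h] using ih
      · rw [if_pos (Or.inl h), if_neg h, List.nil_append,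
          pvFoldA_of_ne _ _ (by simp)]
        simp

-- A's trailing-pop loop and B's trailing-trim loop are the same function
theorem pvPopTrailA_eq (xs : List String) : pvPopTrailA xs = pvDropTrailB xs := by
  induction xs using pvPopTrailA.induct with
  | case1 xs h ih => rw [pvPopTrailA, pvDropTrailB]; simp only [dif_pos h, ih]
  | case2 xs h => rw [pvPopTrailA, pvDropTrailB]; simp only [dif_neg h]

-- ===== VERDICT (by name: the statement is the Claim_ definition above) =====
theorem format_code_for_display_spec : Claim_equal_format_code_for_display := by
  intro code _
  unfold Spec_format_code_for_display format_code_for_display format_code_for_display_alt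
  split
  · rfl
  · simp only [pvFoldA_eq, pvPopTrailA_eq]
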